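-- pv_equiv track=rewrite | github.com/mafflerbach/neural-orchestrator | coordinator_agent/utils.py | resolve_fields
-- ===== SOURCE A (Python) =====
-- from typing import List, Dict, Any
--
-- def resolve_fields(
--     props: Dict[str, Any],
--     context: Dict[str, Any],
--     extracted: Dict[str, Any],
--     prior_responses: Dict[str, Any],
-- ) -> Dict[str, Any]:
--     """
--     Attempts to resolve all fields defined in `props` using:
--     1. the current context (cumulative state),
--     2. extracted LLM results,
--     3. prior service responses.
--
--     Returns a dict of resolved fields.
--     """
--     resolved = {}
--
--     for key in props:
--         if key in context:
--             resolved[key] = context[key]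
--         elif key in extracted:
--             resolved[key] = extracted[key]
--             context[key] = extracted[key]
--         else:
--             # Try fallback to previous service results
--             for resp in prior_responses.values():
--                 if isinstance(resp, dict) and key in resp:
--                     resolved[key] = resp[key]
--                     context[key] = resp[key]
--                     break
--
--     return resolved
-- ===== SOURCE B (Python) =====
-- def resolve_fields(props, context, extracted, prior_responses):
--     """Source-major resolution: collect the not-yet-in-context keys once, fill a
--     `found` map from `extracted` then from prior responses, and emit `resolved`
--     in props order; `context` gets the same updates as the original (via one
--     bulk update at the end)."""
--     pending = [k for k in props if k not in context]
--     found = {}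
--     for k in pending:
--         if k in extracted:
--             found[k] = extracted[k]
--     for k in pending:
--         if k not in found:
--             for resp in prior_responses.values():
--                 if isinstance(resp, dict) and k in resp:
--                     found[k] = resp[k]
--                     break
--     resolved = {}
--     for k in props:
--         if k in context:
--             resolved[k] = context[k]
--         elif k in found:
--             resolved[k] = found[k]
--     context.update(found)
--     return resolved
-- ===== Notes on version B (the rewrite author's own statement) =====
-- stated objective: alternative
-- what changed: Replaces A's key-major loop with interleaved context mutation by a source-major pipeline: one pass computes the pending (not-in-context) keys, one pass fills a found-map from extracted, one pass fills the rest from prior responses, and a final pass emits resolved in props order; return value is identical, context receives the same key/value updates (possibly in a different insertion order).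
import Mathlib
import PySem

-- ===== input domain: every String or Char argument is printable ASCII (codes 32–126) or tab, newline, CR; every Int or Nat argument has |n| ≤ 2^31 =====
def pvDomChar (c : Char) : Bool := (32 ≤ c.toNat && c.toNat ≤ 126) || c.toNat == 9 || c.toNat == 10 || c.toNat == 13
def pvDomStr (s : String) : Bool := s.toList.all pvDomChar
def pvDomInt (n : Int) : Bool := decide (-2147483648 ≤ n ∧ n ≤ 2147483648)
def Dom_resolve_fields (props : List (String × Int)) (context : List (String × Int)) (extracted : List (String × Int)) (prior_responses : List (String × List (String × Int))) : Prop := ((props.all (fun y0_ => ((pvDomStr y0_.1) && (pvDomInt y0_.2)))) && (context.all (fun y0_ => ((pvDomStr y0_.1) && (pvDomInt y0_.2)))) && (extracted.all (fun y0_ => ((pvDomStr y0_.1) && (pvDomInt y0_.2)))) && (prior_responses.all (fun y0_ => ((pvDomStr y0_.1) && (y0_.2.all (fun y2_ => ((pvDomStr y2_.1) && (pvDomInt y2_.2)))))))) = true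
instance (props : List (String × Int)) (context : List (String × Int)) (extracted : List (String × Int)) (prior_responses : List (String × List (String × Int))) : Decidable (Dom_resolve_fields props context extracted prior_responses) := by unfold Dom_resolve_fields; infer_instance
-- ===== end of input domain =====

-- ===== PORT A =====
-- Return-value equivalence: Python A mutates `context` in place; the ports model
-- the returned dict only (B's Python performs the same key/value updates to context,
-- possibly in a different insertion order).
-- first prior response (a dict by type, so `isinstance(resp, dict)` is always true) containing `key`
def pvPriorFind (key : String) : List (PySem.Dict String Int) → Option Int
  | [] => none
  | r :: rest =>
    match r.get? key with
    | some v => some v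
    | none => pvPriorFind key rest

def resolve_fields (props : List (String × Int)) (context : List (String × Int)) (extracted : List (String × Int)) (prior_responses : List (String × List (String × Int))) : List (String × Int) :=
  let ctx0 : PySem.Dict String Int := PySem.Dict.ofList context
  let ext : PySem.Dict String Int := PySem.Dict.ofList extracted
  let priors : List (PySem.Dict String Int) := ((PySem.Dict.ofList prior_responses).values).map PySem.Dict.ofList
  -- state = (resolved, context); `for key in props` iterates the dict's keys
  let st := ((PySem.Dict.ofList props).keys).foldl
    (fun (st : PySem.Dict String Int × PySem.Dict String Int) key =>
      match st.2.get? key with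
      | some v => (st.1.insert key v, st.2)
      | none =>
        match ext.get? key with
        | some v => (st.1.insert key v, st.2.insert key v)
        | none =>
          match pvPriorFind key priors with
          | some v => (st.1.insert key v, st.2.insert key v)
          | none => st)
    (PySem.Dict.empty, ctx0)
  st.1.items

-- ===== PORT B =====
def resolve_fields_alt (props : List (String × Int)) (context : List (String × Int)) (extracted : List (String × Int)) (prior_responses : List (String × List (String × Int))) : List (String × Int) :=
  let ctx0 : PySem.Dict String Int := PySem.Dict.ofList context
  let ext : PySem.Dict String Int := PySem.Dict.ofList extracted
  let priors : List (PySem.Dict String Int) := ((PySem.Dict.ofList prior_responses).values).map PySem.Dict.ofList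
  let keysP := (PySem.Dict.ofList props).keys
  let pending := keysP.filter (fun k => !ctx0.contains k)
  let found1 := pending.foldl
    (fun (f : PySem.Dict String Int) k =>
      match ext.get? k with
      | some v => f.insert k v
      | none => f)
    PySem.Dict.empty
  let found := pending.foldl
    (fun (f : PySem.Dict String Int) k =>
      if f.contains k then f
      else
        match pvPriorFind k priors with
        | some v => f.insert k v
        | none => f)
    found1
  let resolved := keysP.foldl
    (fun (r : PySem.Dict String Int) k =>
      match ctx0.get? k with
      | some v => r.insert k v
      | none =>
        match found.get? k with
        | some v => r.insert k v
        | none => r)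
    PySem.Dict.empty
  -- Source B's final `context.update(found)` mutates the caller's dict only; no effect on the return value
  resolved.items

-- ===== PRECONDITION & SPEC =====
def Spec_resolve_fields (props : List (String × Int)) (context : List (String × Int)) (extracted : List (String × Int)) (prior_responses : List (String × List (String × Int))) (out : List (String × Int)) : Prop := out = resolve_fields_alt props context extracted prior_responses
instance (props : List (String × Int)) (context : List (String × Int)) (extracted : List (String × Int)) (prior_responses : List (String × List (String × Int))) (out : List (String × Int)) : Decidable (Spec_resolve_fields props context extracted prior_responses out) := by unfold Spec_resolve_fields; infer_instance

-- ===== CLAIM (what is proved, stated in full; the proofs are below) =====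
def Claim_equal_resolve_fields : Prop := ∀ (props : List (String × Int)) (context : List (String × Int)) (extracted : List (String × Int)) (prior_responses : List (String × List (String × Int))), Dom_resolve_fields props context extracted prior_responses → Spec_resolve_fields props context extracted prior_responses (resolve_fields props context extracted prior_responses)

-- ===== LEMMAS AND PROOFS =====

-- the value the pipeline resolves key k to (none = unresolved)
def pvVal (ctx0 ext : PySem.Dict String Int) (priors : List (PySem.Dict String Int)) (k : String) : Option Int :=
  match ctx0.get? k with
  | some v => some v
  | none =>
    match ext.get? k with
    | some v => some v
    | none => pvPriorFind k priors

-- A's loop, under the invariant that the running context agrees with ctx0 or with pvVal,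
-- emits exactly the pvVal-fold
theorem A_fold_eq (ctx0 ext : PySem.Dict String Int) (priors : List (PySem.Dict String Int))
    (keys : List String) (res ctx : PySem.Dict String Int)
    (H : ∀ k, ctx.get? k = ctx0.get? k ∨ ctx.get? k = pvVal ctx0 ext priors k) :
    (keys.foldl
      (fun (st : PySem.Dict String Int × PySem.Dict String Int) key =>
        match st.2.get? key with
        | some v => (st.1.insert key v, st.2)
        | none =>
          match ext.get? key with
          | some v => (st.1.insert key v, st.2.insert key v)
          | none =>
            match pvPriorFind key priors with
            | some v => (st.1.insert key v, st.2.insert key v)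
            | none => st)
      (res, ctx)).1
    = keys.foldl
        (fun (r : PySem.Dict String Int) k =>
          match pvVal ctx0 ext priors k with
          | some v => r.insert k v
          | none => r)
        res := by
  induction keys generalizing res ctx with
  | nil => rfl
  | cons k tl ih =>
    simp only [List.foldl_cons]
    rcases hc : ctx.get? k with _ | v
    · have hc0 : ctx0.get? k = none := by
        rcases H k with h | h
        · rw [← h, hc]
        · rw [hc] at h
          unfold pvVal at h
          rcases h0 : ctx0.get? k with _ | w
          · rfl
          · rw [h0] at h; exact absurd h (by simp)
      rcases he : ext.get? k with _ | v
      · rcases hp : pvPriorFind k priors with _ | v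
        · have hvv : pvVal ctx0 ext priors k = none := by
            unfold pvVal; rw [hc0, he, hp]
          simp only [hvv]
          exact ih res ctx H
        · have hvv : pvVal ctx0 ext priors k = some v := by
            unfold pvVal; rw [hc0, he, hp]
          simp only [hvv]
          apply ih
          intro k'
          by_cases hk : k' = k
          · subst hk
            right
            rw [PySem.Dict.get?_insert_self, hvv]
          · rw [PySem.Dict.get?_insert_of_ne _ _ hk]
            exact H k'
      · have hvv : pvVal ctx0 ext priors k = some v := by
          unfold pvVal; rw [hc0, he]
        simp only [hvv]
        apply ih
        intro k'
        by_cases hk : k' = k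
        · subst hk
          right
          rw [PySem.Dict.get?_insert_self, hvv]
        · rw [PySem.Dict.get?_insert_of_ne _ _ hk]
          exact H k'
    · have hvv : pvVal ctx0 ext priors k = some v := by
        rcases H k with h | h
        · unfold pvVal; rw [← h, hc]
        · rw [← h, hc]
      simp only [hvv]
      exact ih (res.insert k v) ctx H

-- pass 1 of B: lookup in the extracted-hits map
theorem found1_get? (ext : PySem.Dict String Int) (P : List String) (acc : PySem.Dict String Int) (x : String) :
    (P.foldl
      (fun (f : PySem.Dict String Int) k =>
        match ext.get? k with
        | some v => f.insert k v
        | none => f) acc).get? x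
    = match ext.get? x with
      | some v => if x ∈ P then some v else acc.get? x
      | none => acc.get? x := by
  induction P generalizing acc with
  | nil => rcases ext.get? x with _ | v <;> simp
  | cons k tl ih =>
    simp only [List.foldl_cons, ih]
    rcases hx : ext.get? x with _ | v
    · rcases he : ext.get? k with _ | w
      · rfl
      · have hk : x ≠ k := fun h => by rw [h, he] at hx; cases hx
        rw [PySem.Dict.get?_insert_of_ne _ _ hk]
    · by_cases ht : x ∈ tl
      · simp [ht, List.mem_cons]
      · simp only [ht, if_false, List.mem_cons]
        by_cases hk : x = k
        · subst hk
          rw [hx]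
          simp [PySem.Dict.get?_insert_self]
        · rw [if_neg (show ¬ (x = k ∨ False) by rintro (h | h); exact hk h; exact h)]
          rcases he : ext.get? k with _ | w
          · rfl
          · rw [PySem.Dict.get?_insert_of_ne _ _ hk]

-- pass 2 of B: lookup after the prior-responses fill
theorem found2_get? (g : String → Option Int) (P : List String) (acc : PySem.Dict String Int) (x : String) :
    (P.foldl
      (fun (f : PySem.Dict String Int) k =>
        if f.contains k then f
        else
          match g k with
          | some v => f.insert k v
          | none => f) acc).get? x
    = match acc.get? x with
      | some v => some v
      | none => if x ∈ P then g x else none := by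
  induction P generalizing acc with
  | nil => rcases hx : acc.get? x with _ | v <;> simp [hx]
  | cons k tl ih =>
    simp only [List.foldl_cons, ih]
    rcases hx : acc.get? x with _ | v
    · by_cases hk : x = k
      · subst hk
        have hck : acc.contains x = false := by
          rw [PySem.Dict.contains_eq_isSome_get?, hx]; rfl
        simp only [hck, Bool.false_eq_true, if_false]
        rcases hg : g x with _ | v
        · simp only [hx, List.mem_cons, true_or, if_true]
          by_cases ht : x ∈ tl
          · simp [ht]
          · simp [ht]
        · rw [PySem.Dict.get?_insert_self]
          simp [List.mem_cons]
      · have hax : (if acc.contains k then acc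
            else
              match g k with
              | some v => acc.insert k v
              | none => acc).get? x = acc.get? x := by
          split
          · rfl
          · rcases g k with _ | w
            · rfl
            · rw [PySem.Dict.get?_insert_of_ne _ _ hk]
        rw [hax, hx]
        simp [List.mem_cons, hk]
    · have hax : (if acc.contains k then acc
          else
            match g k with
            | some v => acc.insert k v
            | none => acc).get? x = some v := by
        split
        · exact hx
        · rcases g k with _ | w
          · exact hx
          · by_cases hk : x = k
            · subst hk
              rename_i hck
              exact absurd (by rw [PySem.Dict.contains_eq_isSome_get?, hx]; rfl) hck
            · rw [PySem.Dict.get?_insert_of_ne _ _ hk]; exact hx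
      rw [hax]

theorem resolve_fields_eq_alt (props context extracted prior_responses) :
    resolve_fields props context extracted prior_responses = resolve_fields_alt props context extracted prior_responses := by
  simp only [resolve_fields, resolve_fields_alt]
  rw [A_fold_eq (PySem.Dict.ofList context) (PySem.Dict.ofList extracted)
        (((PySem.Dict.ofList prior_responses).values).map PySem.Dict.ofList)
        (PySem.Dict.ofList props).keys PySem.Dict.empty (PySem.Dict.ofList context)
        (fun k => Or.inl rfl)]
  congr 1
  apply PySem.List.foldl_congr_mem
  intro r k hk
  rcases h0 : (PySem.Dict.ofList context).get? k with _ | v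
  · have hpend : k ∈ ((PySem.Dict.ofList props).keys).filter
        (fun k => !(PySem.Dict.ofList context).contains k) := by
      rw [List.mem_filter]
      refine ⟨hk, ?_⟩
      rw [PySem.Dict.contains_eq_isSome_get?, h0]
      rfl
    rw [found2_get?, found1_get?, PySem.Dict.get?_empty]
    have hvu : pvVal (PySem.Dict.ofList context) (PySem.Dict.ofList extracted)
        (((PySem.Dict.ofList prior_responses).values).map PySem.Dict.ofList) k
        = match (PySem.Dict.ofList extracted).get? k with
          | some v => some v
          | none => pvPriorFind k (((PySem.Dict.ofList prior_responses).values).map PySem.Dict.ofList) := by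
      unfold pvVal; rw [h0]
    rw [hvu]
    rcases he : (PySem.Dict.ofList extracted).get? k with _ | v
    · simp [hpend]
    · simp [hpend]
  · have hvv : pvVal (PySem.Dict.ofList context) (PySem.Dict.ofList extracted)
        (((PySem.Dict.ofList prior_responses).values).map PySem.Dict.ofList) k = some v := by
      unfold pvVal; rw [h0]
    rw [hvv]

-- ===== VERDICT (by name: the statement is the Claim_ definition above) =====
theorem resolve_fields_spec : Claim_equal_resolve_fields := by
  intro props context extracted prior_responses _
  unfold Spec_resolve_fields
  exact resolve_fields_eq_alt props context extracted prior_responses
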